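-- pv_equiv track=rewrite | github.com/Agentum07/CS3245 | HW1/A0226594W 3/index.py | build_skip_list
-- ===== SOURCE A (Python) =====
-- from math import floor, ceil, sqrt
--
-- def build_skip_list(posting_list):
--     skip_ptr_list = []
--     jump = ceil(sqrt(len(posting_list)))
--     for idx, posting in enumerate(posting_list):
--         if idx % jump == 0 and (idx + jump) < len(posting_list):
--             next_val = posting_list[idx + jump]
--             skip_ptr_list.append(posting + "|" + next_val)
--         else:
--             skip_ptr_list.append(posting)
--
--     return skip_ptr_list
-- ===== SOURCE B (Python) =====
-- from math import ceil, sqrt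
--
-- def build_skip_list(posting_list):
--     if not posting_list:
--         return []
--     jump = ceil(sqrt(len(posting_list)))
--     return _link_chunks(posting_list, jump)
--
-- def _link_chunks(lst, jump):
--     # Chunk the postings into blocks of `jump`; the first posting of each block
--     # gets a skip pointer to the first posting of the next block (if any).
--     if len(lst) <= jump:
--         return list(lst)
--     head, rest = lst[:jump], lst[jump:]
--     head[0] = head[0] + "|" + rest[0]
--     return head + _link_chunks(rest, jump)
-- ===== Notes on version B (the rewrite author's own statement) =====
-- stated objective: alternative
-- what changed: B replaces A's single indexed scan with an idx % jump test by a recursive chunk decomposition: split the postings into sqrt-sized blocks and link the head of each block to the head of the next, with no index arithmetic at all (slower constant-wise due to block slicing).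
import Mathlib
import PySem

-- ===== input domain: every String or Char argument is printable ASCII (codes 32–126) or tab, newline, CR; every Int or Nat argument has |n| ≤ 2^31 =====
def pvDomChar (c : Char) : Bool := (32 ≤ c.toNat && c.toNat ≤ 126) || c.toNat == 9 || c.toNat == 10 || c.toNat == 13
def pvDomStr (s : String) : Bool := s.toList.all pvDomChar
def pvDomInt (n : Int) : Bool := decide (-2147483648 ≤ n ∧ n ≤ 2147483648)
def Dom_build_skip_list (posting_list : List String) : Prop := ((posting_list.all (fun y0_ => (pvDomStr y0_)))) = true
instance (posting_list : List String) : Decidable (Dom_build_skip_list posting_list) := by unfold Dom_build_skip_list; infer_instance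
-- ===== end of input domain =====

-- B replaces A's indexed scan with an idx % jump test by a recursive chunk decomposition
-- (split into sqrt-sized blocks, link each block head to the next block's head): same value,
-- a genuinely different traversal with no index arithmetic ("alternative" objective).


-- ===== PORT A =====
-- ceil(sqrt(n)) for a Nat n: exact for the list lengths in the domain (IEEE double sqrt is
-- correctly rounded, so math.ceil(math.sqrt(n)) equals the exact integer ceiling for n ≤ 2^31).
-- Used by both ports (both Pythons compute ceil(sqrt(len(posting_list)))).
def ceilSqrt (n : Nat) : Nat :=
  if Nat.sqrt n * Nat.sqrt n = n then Nat.sqrt n else Nat.sqrt n + 1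

def build_skip_list (posting_list : List String) : List String :=
  let jump : Int := (ceilSqrt posting_list.length : Int)
  (PySem.List.enumerate posting_list 0).foldl
    (fun acc p =>
      if PySem.Int.mod p.1 jump = 0 ∧ p.1 + jump < (posting_list.length : Int) then
        acc ++ [p.2 ++ "|" ++ PySem.List.pyGetD posting_list (p.1 + jump) ""]
      else
        acc ++ [p.2]) []

-- ===== PORT B =====
-- _link_chunks from Source B: recursion on the list; `fuel` (called with the list's length) only
-- bounds the recursion depth for totality — with jump ≥ 1 (the only way B calls it) it is
-- never exhausted. lst[:jump] / lst[jump:] with jump ≥ 0 are take/drop (PySem.List.slice_natCast).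
def linkChunks (fuel : Nat) (lst : List String) (jump : Nat) : List String :=
  match fuel with
  | 0 => lst
  | fuel + 1 =>
    if lst.length ≤ jump then lst
    else
      let head := lst.take jump
      let rest := lst.drop jump
      head.set 0 (head.headD "" ++ "|" ++ rest.headD "") ++ linkChunks fuel rest jump

def build_skip_list_alt (posting_list : List String) : List String :=
  if posting_list = [] then []
  else linkChunks posting_list.length posting_list (ceilSqrt posting_list.length)

-- ===== PRECONDITION & SPEC =====
def Spec_build_skip_list (posting_list : List String) (out : List String) : Prop := out = build_skip_list_alt posting_list
instance (posting_list : List String) (out : List String) : Decidable (Spec_build_skip_list posting_list out) := by unfold Spec_build_skip_list; infer_instance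

-- ===== CLAIM (what is proved, stated in full; the proofs are below) =====
def Claim_equal_build_skip_list : Prop := ∀ (posting_list : List String), Dom_build_skip_list posting_list → Spec_build_skip_list posting_list (build_skip_list posting_list)

-- ===== LEMMAS AND PROOFS =====

lemma ceilSqrt_pos {n : Nat} (h : 0 < n) : 0 < ceilSqrt n := by
  unfold ceilSqrt
  split_ifs with hsq
  · rcases Nat.eq_zero_or_pos (Nat.sqrt n) with h0 | h0
    · rw [h0] at hsq; omega
    · exact h0
  · omega

-- A's fold is a map over enumerate.
lemma build_skip_list_eq_map (posting_list : List String) :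
    build_skip_list posting_list =
      (PySem.List.enumerate posting_list 0).map
        (fun p =>
          if PySem.Int.mod p.1 ((ceilSqrt posting_list.length : Nat) : Int) = 0 ∧
              p.1 + ((ceilSqrt posting_list.length : Nat) : Int) < (posting_list.length : Int) then
            p.2 ++ "|" ++
              PySem.List.pyGetD posting_list (p.1 + ((ceilSqrt posting_list.length : Nat) : Int)) ""
          else p.2) := by
  unfold build_skip_list
  simp only []
  have hbody : ∀ (acc : List String) (p : Int × String),
      (if PySem.Int.mod p.1 ((ceilSqrt posting_list.length : Nat) : Int) = 0 ∧
          p.1 + ((ceilSqrt posting_list.length : Nat) : Int) < (posting_list.length : Int) then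
        acc ++ [p.2 ++ "|" ++
          PySem.List.pyGetD posting_list (p.1 + ((ceilSqrt posting_list.length : Nat) : Int)) ""]
      else acc ++ [p.2]) =
      acc ++ [if PySem.Int.mod p.1 ((ceilSqrt posting_list.length : Nat) : Int) = 0 ∧
          p.1 + ((ceilSqrt posting_list.length : Nat) : Int) < (posting_list.length : Int) then
        p.2 ++ "|" ++
          PySem.List.pyGetD posting_list (p.1 + ((ceilSqrt posting_list.length : Nat) : Int)) ""
      else p.2] := by
    intro acc p
    split_ifs <;> rfl
  simp only [hbody]
  exact PySem.List.foldl_append_singleton_eq_map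
    (fun p : Int × String =>
      if PySem.Int.mod p.1 ((ceilSqrt posting_list.length : Nat) : Int) = 0 ∧
          p.1 + ((ceilSqrt posting_list.length : Nat) : Int) < (posting_list.length : Int) then
        p.2 ++ "|" ++
          PySem.List.pyGetD posting_list (p.1 + ((ceilSqrt posting_list.length : Nat) : Int)) ""
      else p.2) (PySem.List.enumerate posting_list 0) []

-- A's result, elementwise.
lemma build_skip_list_getElem? (posting_list : List String) (i : Nat) :
    (build_skip_list posting_list)[i]? =
      (if (ceilSqrt posting_list.length : Int) ∣ (i : Int) ∧
          (i : Int) + (ceilSqrt posting_list.length : Int) < (posting_list.length : Int) then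
        posting_list[i]?.map (fun p => p ++ "|" ++
          PySem.List.pyGetD posting_list ((i : Int) + (ceilSqrt posting_list.length : Int)) "")
      else posting_list[i]?) := by
  rw [build_skip_list_eq_map, List.getElem?_map, PySem.List.getElem?_enumerate]
  cases hx : posting_list[i]? with
  | none => simp
  | some x =>
    simp only [Option.map_some]
    simp only [PySem.Int.mod_eq_zero_iff_dvd]
    simp [apply_ite]
    split_ifs with h
    · intro h2
      exact absurd (h2 h.1) (by omega)
    · intro h1 h2
      exact absurd ⟨h1, h2⟩ h

-- B's recursion, elementwise (fuel at least the list length, jump ≥ 1).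
lemma linkChunks_getElem? (jump : Nat) (hj : 0 < jump) :
    ∀ (fuel : Nat) (lst : List String), lst.length ≤ fuel → ∀ (i : Nat),
      (linkChunks fuel lst jump)[i]? =
        (if jump ∣ i ∧ i + jump < lst.length then
          lst[i]?.map (fun p => p ++ "|" ++ lst.getD (i + jump) "")
        else lst[i]?) := by
  intro fuel
  induction fuel with
  | zero =>
    intro lst hf i
    have : lst = [] := List.eq_nil_of_length_eq_zero (by omega)
    subst this
    simp [linkChunks]
  | succ fuel ih =>
    intro lst hf i
    by_cases hle : lst.length ≤ jump
    · rw [linkChunks, if_pos hle, if_neg (by rintro ⟨_, h⟩; omega)]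
    · push_neg at hle
      rw [linkChunks, if_neg (by omega)]
      simp only []
      have hlen_take : (lst.take jump).length = jump := by
        simp; omega
      have hlen_set : ((lst.take jump).set 0
          ((lst.take jump).headD "" ++ "|" ++ (lst.drop jump).headD "")).length = jump := by
        simp [hlen_take]
      by_cases hi : i < jump
      · rw [List.getElem?_append_left (by omega)]
        by_cases hi0 : i = 0
        · subst hi0
          rw [List.getElem?_set_self (by omega), if_pos ⟨dvd_zero jump, by omega⟩]
          cases lst with
          | nil => simp at hle
          | cons a t =>
            have htake : (a :: t).take jump = a :: t.take (jump - 1) := by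
              cases jump with
              | zero => omega
              | succ m => simp [List.take_succ_cons]
            cases hdj : (a :: t).drop jump with
            | nil =>
              have h2 : ((a :: t).drop jump).length = 0 := by rw [hdj]; rfl
              rw [List.length_drop] at h2
              simp at h2 hle
              omega
            | cons b u =>
              have hb : (a :: t)[jump]? = some b := by rw [← List.head?_drop, hdj]; rfl
              simp [htake, List.headD, List.getD, hb]
        · have hnd : ¬ (jump ∣ i) := fun hd =>
            absurd (Nat.le_of_dvd (by omega) hd) (by omega)
          rw [if_neg (by tauto), List.getElem?_set_ne (by omega),
            List.getElem?_take_of_lt (by omega)]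
      · push_neg at hi
        rw [List.getElem?_append_right (by omega), hlen_set]
        rw [ih (lst.drop jump) (by simp; omega) (i - jump)]
        have hdvd : (jump ∣ i - jump) ↔ (jump ∣ i) := by
          constructor
          · intro h
            have : jump ∣ (i - jump) + jump := Dvd.dvd.add h (dvd_refl jump)
            rwa [Nat.sub_add_cancel hi] at this
          · intro h; exact Nat.dvd_sub h (dvd_refl jump)
        have hdlen : (lst.drop jump).length = lst.length - jump := by simp
        have hcond : (jump ∣ i - jump ∧ i - jump + jump < (lst.drop jump).length) ↔
            (jump ∣ i ∧ i + jump < lst.length) := by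
          rw [hdvd, hdlen, Nat.sub_add_cancel hi]
          constructor
          · rintro ⟨h1, h2⟩; exact ⟨h1, by omega⟩
          · rintro ⟨h1, h2⟩; exact ⟨h1, by omega⟩
        have hget : (lst.drop jump)[i - jump]? = lst[i]? := by
          rw [List.getElem?_drop]
          congr 1
          omega
        have hgetD : (lst.drop jump).getD (i - jump + jump) "" = lst.getD (i + jump) "" := by
          simp only [List.getD, List.getElem?_drop]
          congr 2
          omega
        rw [hget, hgetD]
        split_ifs with h1 h2 h2
        · rfl
        · exact absurd (hcond.mp h1) h2
        · exact absurd (hcond.mpr h2) h1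
        · rfl
-- ===== VERDICT (by name: the statement is the Claim_ definition above) =====
theorem build_skip_list_spec : Claim_equal_build_skip_list := by
  intro posting_list _
  unfold Spec_build_skip_list build_skip_list_alt
  by_cases hnil : posting_list = []
  · subst hnil
    simp [build_skip_list, PySem.List.enumerate]
  · rw [if_neg hnil]
    have hlen : 0 < posting_list.length := List.length_pos_iff.mpr hnil
    have hj : 0 < ceilSqrt posting_list.length := ceilSqrt_pos hlen
    apply List.ext_getElem?
    intro i
    rw [build_skip_list_getElem?,
      linkChunks_getElem? (ceilSqrt posting_list.length) hj posting_list.length posting_list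
        (le_refl _) i]
    have hdvd : ((ceilSqrt posting_list.length : Int) ∣ (i : Int)) ↔
        (ceilSqrt posting_list.length ∣ i) := Int.natCast_dvd_natCast
    have hlt : ((i : Int) + (ceilSqrt posting_list.length : Int) < (posting_list.length : Int)) ↔
        (i + ceilSqrt posting_list.length < posting_list.length) := by
      constructor <;> intro h <;> [exact_mod_cast h; exact_mod_cast h]
    have hval : PySem.List.pyGetD posting_list
          ((i : Int) + (ceilSqrt posting_list.length : Int)) "" =
        posting_list.getD (i + ceilSqrt posting_list.length) "" := by
      rw [show (i : Int) + (ceilSqrt posting_list.length : Int) =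
          ((i + ceilSqrt posting_list.length : Nat) : Int) from (by push_cast; ring)]
      exact PySem.List.pyGetD_natCast ..
    rw [hval]
    split_ifs with h1 h2 h2
    · rfl
    · exact absurd ⟨hdvd.mp h1.1, hlt.mp h1.2⟩ h2
    · exact absurd ⟨hdvd.mpr h2.1, hlt.mpr h2.2⟩ h1
    · rfl
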